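-- pv_equiv track=rewrite | github.com/izelentsov/jb-python-developer | Regex Engine/Regex Engine/task/regex/regex.py | re_len
-- ===== SOURCE A (Python) =====
-- def re_len(re):
--     i = 0
--     cnt = 0
--     total = len(re)
--     while i < total:
--         cnt += 1
--         i += 1 if re[i] != '\\' else 2
--     return cnt
-- ===== SOURCE B (Python) =====
-- def re_len(re):
--     # Count tokens as len(re) minus the number of escaped characters,
--     # computed arithmetically from the lengths of maximal backslash runs.
--     tokens = len(re)
--     run = 0
--     for ch in re:
--         if ch == '\\':
--             run += 1
--         else:
--             tokens -= run // 2   # each pair of backslashes hides one backslash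
--             if run % 2:
--                 tokens -= 1      # an odd run escapes this character too
--             run = 0
--     tokens -= run // 2           # trailing run: pairs only, lone backslash still a token
--     return tokens
-- ===== Notes on version B (the rewrite author's own statement) =====
-- stated objective: alternative
-- what changed: A counts loop iterations while jumping the index by 2 past each backslash; B instead computes len(re) minus the number of escaped characters, derived arithmetically from the lengths of maximal backslash runs (k//2 hidden backslashes per run, plus the following character for an odd run).
import Mathlib
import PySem

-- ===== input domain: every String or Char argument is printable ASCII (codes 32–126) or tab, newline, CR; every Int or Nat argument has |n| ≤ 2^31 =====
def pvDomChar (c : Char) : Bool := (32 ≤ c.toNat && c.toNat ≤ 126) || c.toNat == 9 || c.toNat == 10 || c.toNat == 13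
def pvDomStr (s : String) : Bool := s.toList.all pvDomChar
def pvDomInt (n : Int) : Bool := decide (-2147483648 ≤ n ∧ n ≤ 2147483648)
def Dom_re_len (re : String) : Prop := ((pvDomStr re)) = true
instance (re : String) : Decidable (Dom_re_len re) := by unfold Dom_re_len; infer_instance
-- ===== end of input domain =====

-- B counts len(re) minus the number of escaped characters, derived arithmetically
-- from the lengths of maximal backslash runs, instead of A's index-jumping scan.

-- ===== PORT A =====
-- A's while loop over index i; i is always in range when accessed,
-- so cs[i]?.getD ' ' is exactly Python's re[i] on every reached index.
def reA_loop (cs : List Char) (i : Nat) (cnt : Int) : Int :=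
  if h : i < cs.length then
    reA_loop cs (if cs[i]?.getD ' ' ≠ '\\' then i + 1 else i + 2) (cnt + 1)
  else cnt
termination_by cs.length - i
decreasing_by all_goals (split <;> omega)

def re_len (re : String) : Int := reA_loop re.toList 0 0

-- ===== PORT B =====
-- state = (tokens, run) : tokens so far, length of the current backslash run
def reB_step (st : Int × Int) (c : Char) : Int × Int :=
  if c == '\\' then (st.1, st.2 + 1)
  else ((st.1 - PySem.Int.floordiv st.2 2) - (if PySem.Int.mod st.2 2 ≠ 0 then 1 else 0), 0)

def re_len_alt (re : String) : Int :=
  let st := re.toList.foldl reB_step ((re.toList.length : Int), 0)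
  st.1 - PySem.Int.floordiv st.2 2

-- ===== PRECONDITION & SPEC =====
def Spec_re_len (re : String) (out : Int) : Prop := out = re_len_alt re
instance (re : String) (out : Int) : Decidable (Spec_re_len re out) := by unfold Spec_re_len; infer_instance

-- ===== CLAIM (what is proved, stated in full; the proofs are below) =====
def Claim_equal_re_len : Prop := ∀ (re : String), Dom_re_len re → Spec_re_len re (re_len re)

-- ===== LEMMAS AND PROOFS =====

-- reference token count: consume one char, or two after a backslash
def cnt2 : List Char → Int
  | [] => 0
  | c :: t => 1 + cnt2 (if c = '\\' then t.drop 1 else t)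
termination_by l => l.length
decreasing_by simp only [List.length_cons]; split <;> simp

theorem reA_loop_eq (cs : List Char) (i : Nat) (cnt : Int) :
    reA_loop cs i cnt = cnt + cnt2 (cs.drop i) := by
  by_cases h : i < cs.length
  · rw [reA_loop]
    simp only [h, dif_pos]
    have hdrop : cs.drop i = cs[i] :: cs.drop (i + 1) := (List.getElem_cons_drop h).symm
    by_cases hc : cs[i] = '\\'
    · have hni : ¬ (cs[i]?.getD ' ' ≠ '\\') := by simp [List.getElem?_eq_getElem h, hc]
      rw [if_neg hni, reA_loop_eq cs (i + 2) (cnt + 1), hdrop, cnt2]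
      have h2 : cs.drop (i + 2) = (cs.drop (i + 1)).drop 1 := by rw [List.drop_drop]
      rw [h2, if_pos hc]; ring
    · have hi : (cs[i]?.getD ' ' ≠ '\\') := by simp [List.getElem?_eq_getElem h, hc]
      rw [if_pos hi, reA_loop_eq cs (i + 1) (cnt + 1), hdrop, cnt2, if_neg hc]; ring
  · rw [reA_loop]
    simp only [h, dif_neg, not_false_iff]
    rw [List.drop_eq_nil_of_le (by omega)]
    simp [cnt2]
termination_by cs.length - i
decreasing_by all_goals omega

theorem floordiv_nat (m : Nat) : PySem.Int.floordiv (m : Int) 2 = ((m / 2 : Nat) : Int) :=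
  PySem.Int.floordiv_natCast m 2

-- cnt2 on a run of backslashes followed by nothing
theorem cnt2_rep (k : Nat) : cnt2 (List.replicate k '\\') = (k : Int) - ((k / 2 : Nat) : Int) := by
  induction k using Nat.strong_induction_on with
  | _ k ih =>
    match k with
    | 0 => simp [cnt2]
    | 1 => simp [cnt2, List.replicate]
    | (m + 2) =>
      have : List.replicate (m + 2) '\\' = '\\' :: '\\' :: List.replicate m '\\' := by
        simp [List.replicate_succ]
      rw [this, cnt2]
      simp only [if_true, List.drop_one, List.tail_cons]
      rw [ih m (by omega)]
      have : (m + 2) / 2 = m / 2 + 1 := by omega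
      rw [this]; push_cast; ring

-- cnt2 on a run of backslashes followed by a non-backslash char and a tail
theorem cnt2_rep_cons (k : Nat) (c : Char) (hc : c ≠ '\\') (t : List Char) :
    cnt2 (List.replicate k '\\' ++ c :: t) = ((k / 2 : Nat) : Int) + 1 + cnt2 t := by
  induction k using Nat.strong_induction_on with
  | _ k ih =>
    match k with
    | 0 => simp [cnt2, if_neg hc]
    | 1 =>
      simp only [List.replicate, List.nil_append, List.cons_append, cnt2,
        List.drop_one, List.tail_cons]
      norm_num
    | (m + 2) =>
      have hrep : List.replicate (m + 2) '\\' ++ c :: t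
          = '\\' :: '\\' :: (List.replicate m '\\' ++ c :: t) := by
        simp [List.replicate_succ]
      rw [hrep, cnt2]
      simp only [if_true, List.drop_one, List.tail_cons]
      rw [ih m (by omega)]
      have : (m + 2) / 2 = m / 2 + 1 := by omega
      rw [this]; push_cast; ring

-- B's fold invariant: pending run of k backslashes, tokens t, remaining list l
theorem reB_inv (l : List Char) (t : Int) (k : Nat) :
    (let st := l.foldl reB_step (t, (k : Int))
     st.1 - PySem.Int.floordiv st.2 2)
      = t - l.length - k + cnt2 (List.replicate k '\\' ++ l) := by
  induction l generalizing t k with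
  | nil =>
    simp only [List.foldl_nil, List.append_nil, cnt2_rep, List.length_nil, floordiv_nat]
    push_cast; ring
  | cons c rest ih =>
    by_cases hc : c = '\\'
    · have hstep : reB_step (t, (k : Int)) c = (t, ((k + 1 : Nat) : Int)) := by
        simp [reB_step, hc]
      have hrep : List.replicate k '\\' ++ c :: rest = List.replicate (k + 1) '\\' ++ rest := by
        rw [hc, List.replicate_succ']; simp
      simp only [List.foldl_cons, hstep, ih, hrep]
      simp only [List.length_cons]
      push_cast
      ring
    · have hb : (c == '\\') = false := by simp [hc]
      have hstep : reB_step (t, (k : Int)) c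
          = (t - ((k / 2 : Nat) : Int) - (if (k % 2 : Nat) ≠ 0 then 1 else 0), ((0 : Nat) : Int)) := by
        by_cases hp : k % 2 = 0
        · have h0 : ((k % 2 : Nat) : Int) = 0 := by exact_mod_cast hp
          simp [reB_step, hb, hp]
          all_goals omega
        · have h0 : ((k % 2 : Nat) : Int) ≠ 0 := by exact_mod_cast hp
          simp [reB_step, hb, hp]
          all_goals omega
      simp only [List.foldl_cons, hstep, ih, List.nil_append, List.replicate]
      rw [cnt2_rep_cons k c hc rest]
      have hP : (if (k % 2 : Nat) ≠ 0 then (1 : Int) else 0) = ((k % 2 : Nat) : Int) := by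
        by_cases hp : (k % 2 : Nat) = 0
        · simp [hp]
        · have h1 : k % 2 = 1 := by omega
          simp [h1]
      rw [hP]
      have hdiv : ((k % 2 : Nat) : Int) + 2 * ((k / 2 : Nat) : Int) = (k : Int) := by
        push_cast; omega
      simp only [List.length_cons, Nat.cast_zero, Nat.cast_add, Nat.cast_one]
      linarith [hdiv]

-- ===== VERDICT (by name: the statement is the Claim_ definition above) =====
theorem re_len_spec : Claim_equal_re_len := by
  intro re _
  unfold Spec_re_len re_len re_len_alt
  rw [reA_loop_eq]
  have := reB_inv re.toList (re.toList.length : Int) 0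
  simp only [Nat.cast_zero, List.replicate, List.nil_append] at this
  simp only [List.drop_zero, this]
  ring
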